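-- pv_equiv track=rewrite | github.com/madhuravee27/IP_Proj2_araja2_mraveen | Code/p2mpserver.py | validate_checksum
-- ===== SOURCE A (Python) =====
-- def carry_around_add(a, b):
--     c = a + b
--     return (c & 0xffff) + (c >> 16)
--
-- def validate_checksum(data, received_checksum):
--     checksum_value = 0
--     for i in range(0, len(data), 2):
--         #i = ord(i[0])<<8 | ord(i[1])
--         if(i == (len(data)-1)):
--             break
--         i = ord(data[i]) + (ord(data[i+1]) << 8)
--         checksum_value = carry_around_add(checksum_value,i)
--     if((checksum_value & received_checksum) == 0):
--         return True
--     else: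
--         return False
-- ===== SOURCE B (Python) =====
-- def validate_checksum(data, received_checksum):
--     n = len(data) - len(data) % 2
--     total = 0
--     for i, c in enumerate(data[:n]):
--         total += ord(c) << (8 * (i % 2))
--     folded = total if total == 0 else (total - 1) % 0xffff + 1
--     return (folded & received_checksum) == 0
-- ===== Notes on version B (the rewrite author's own statement) =====
-- stated objective: alternative
-- what changed: B never walks byte pairs and has no carry handling at all: one per-character pass over enumerate(data[:n]) weighting each byte by its index parity (ord(c) << 8*(i%2)), then a single closed-form carry collapse folded = (total-1) % 0xffff + 1 (the mod-65535 characterisation of one's-complement addition), replacing A's indexed pair loop with its carry_around_add fold after every addition and its in-loop break.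
import Mathlib
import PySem

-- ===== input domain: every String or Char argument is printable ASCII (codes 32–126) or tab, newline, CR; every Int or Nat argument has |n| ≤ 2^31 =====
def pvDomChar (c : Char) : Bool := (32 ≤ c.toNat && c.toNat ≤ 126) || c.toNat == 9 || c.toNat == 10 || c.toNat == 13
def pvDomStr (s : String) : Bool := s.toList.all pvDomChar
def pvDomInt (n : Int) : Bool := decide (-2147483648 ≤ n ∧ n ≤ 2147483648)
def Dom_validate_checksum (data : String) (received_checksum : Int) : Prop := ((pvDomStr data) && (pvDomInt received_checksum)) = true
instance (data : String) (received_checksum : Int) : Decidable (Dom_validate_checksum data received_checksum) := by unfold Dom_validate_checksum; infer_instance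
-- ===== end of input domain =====

-- B replaces A's indexed pair loop with carry_around_add after every step by a per-character
-- enumerate pass weighted by index parity plus one closed-form mod-65535 carry collapse (alternative, same cost).


-- ord(data[i]) : the loop structure of both programs keeps the index in range on every
-- input, so the default of pyGetD is never used; shared by both ports.
def ordAt (cs : List Char) (i : Int) : Int := ((PySem.List.pyGetD cs i ' ').toNat : Int)

-- ===== PORT A =====
def carry_around_add (a b : Int) : Int :=
  let c := a + b
  PySem.Int.band c 65535 + (c >>> (16:Nat))

-- the for-loop with its break, as recursion over the range list
def validateGoA (cs : List Char) (idxs : List Int) (checksum_value : Int) : Int :=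
  match idxs with
  | [] => checksum_value
  | i :: rest =>
    if i = (cs.length : Int) - 1 then checksum_value
    else validateGoA cs rest (carry_around_add checksum_value (ordAt cs i + (ordAt cs (i + 1)) <<< (8:Nat)))

def validate_checksum (data : String) (received_checksum : Int) : Bool :=
  let cs := data.toList
  let checksum_value := validateGoA cs (PySem.List.pyRange 0 (cs.length : Int) 2) 0
  if PySem.Int.band checksum_value received_checksum = 0 then true else false

-- ===== PORT B =====
def validate_checksum_alt (data : String) (received_checksum : Int) : Bool :=
  let cs := data.toList
  let n : Int := (cs.length : Int) - PySem.Int.mod (cs.length : Int) 2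
  let total := (PySem.List.enumerate (PySem.List.slice cs none (some n)) 0).foldl
    (fun acc p => acc + ((p.2.toNat : Int) <<< (8 * PySem.Int.mod p.1 2).toNat)) 0
  let folded := if total = 0 then total else PySem.Int.mod (total - 1) 65535 + 1
  decide (PySem.Int.band folded received_checksum = 0)

-- ===== PRECONDITION & SPEC =====
def Spec_validate_checksum (data : String) (received_checksum : Int) (out : Bool) : Prop := out = validate_checksum_alt data received_checksum
instance (data : String) (received_checksum : Int) (out : Bool) : Decidable (Spec_validate_checksum data received_checksum out) := by unfold Spec_validate_checksum; infer_instance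

-- ===== CLAIM (what is proved, stated in full; the proofs are below) =====
def Claim_equal_validate_checksum : Prop := ∀ (data : String) (received_checksum : Int), Dom_validate_checksum data received_checksum → Spec_validate_checksum data received_checksum (validate_checksum data received_checksum)

-- ===== LEMMAS AND PROOFS =====

-- canonical one's-complement value of a nonnegative sum
def ccNorm (x : Int) : Int := if x = 0 then 0 else (x - 1) % 65535 + 1

def wordAt (cs : List Char) (i : Int) : Int := ordAt cs i + (ordAt cs (i + 1)) <<< (8:Nat)

-- the common reference value: the sum of the 16-bit little-endian words of the pairs
def pairSum : List Char → Int
  | [] => 0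
  | [_] => 0
  | a :: b :: r => (a.toNat : Int) + 256 * (b.toNat : Int) + pairSum r

-- B's running sum as a function of the remaining list and the current index
def wsum : List Char → Int → Int
  | [], _ => 0
  | c :: r, s => ((c.toNat : Int) <<< (8 * PySem.Int.mod s 2).toNat) + wsum r (s + 1)

theorem ordAt_bounds (cs : List Char) (hc : ∀ c ∈ cs, pvDomChar c = true) (i : Int) :
    0 ≤ ordAt cs i ∧ ordAt cs i ≤ 126 := by
  unfold ordAt PySem.List.pyGetD
  cases hg : PySem.List.pyGet? cs i with
  | none => simp
  | some c =>
    have hmem : c ∈ cs := by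
      unfold PySem.List.pyGet? at hg
      cases hk : PySem.List.pyIdx? cs.length i with
      | none => simp [hk] at hg
      | some k =>
        simp [hk] at hg
        exact List.mem_of_getElem? hg
    have := hc c hmem
    unfold pvDomChar at this
    simp only [Bool.or_eq_true, Bool.and_eq_true, decide_eq_true_eq, beq_iff_eq] at this
    simp only [Option.getD_some]
    omega

theorem wordAt_bounds (cs : List Char) (hc : ∀ c ∈ cs, pvDomChar c = true) (i : Int) :
    0 ≤ wordAt cs i ∧ wordAt cs i ≤ 32382 := by
  have h1 := ordAt_bounds cs hc i
  have h2 := ordAt_bounds cs hc (i + 1)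
  unfold wordAt
  simp only [Int.shiftLeft_eq]
  constructor <;> nlinarith

theorem ccNorm_bounds (x : Int) (_hx : 0 ≤ x) : 0 ≤ ccNorm x ∧ ccNorm x ≤ 65535 := by
  unfold ccNorm; split <;> omega

theorem carry_around_add_eq (a b : Int) (ha : 0 ≤ a) (ha' : a ≤ 65535) (hb : 0 ≤ b)
    (hb' : b ≤ 65535) : carry_around_add a b = ccNorm (a + b) := by
  show PySem.Int.band (a + b) 65535 + ((a + b) >>> (16:Nat)) = ccNorm (a + b)
  unfold ccNorm
  rw [PySem.Int.band_of_nonneg (by omega) (by omega), Int.shiftRight_eq_div_pow]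
  have hand : (a + b).toNat &&& (65535 : Int).toNat = (a + b).toNat % 65536 := by
    simpa using Nat.and_two_pow_sub_one_eq_mod (a + b).toNat 16
  rw [hand]
  split <;> omega

theorem ccNorm_add (x S : Int) (hx : 0 ≤ x) (hS : 0 ≤ S) :
    ccNorm (ccNorm x + S) = ccNorm (x + S) := by
  unfold ccNorm
  split_ifs <;> omega

theorem foldA_eq_ccNorm (cs : List Char) (hc : ∀ c ∈ cs, pvDomChar c = true)
    (idxs : List Int) : ∀ acc : Int, 0 ≤ acc → acc ≤ 65535 →
    idxs.foldl (fun a i => carry_around_add a (wordAt cs i)) acc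
      = ccNorm (acc + (idxs.map (wordAt cs)).sum) := by
  induction idxs with
  | nil =>
    intro acc h1 h2
    simp [ccNorm]; omega
  | cons i rest ih =>
    intro acc h1 h2
    have hw := wordAt_bounds cs hc i
    have hsum : 0 ≤ (rest.map (wordAt cs)).sum := by
      apply List.sum_nonneg
      intro x hx
      obtain ⟨j, _, rfl⟩ := List.mem_map.mp hx
      exact (wordAt_bounds cs hc j).1
    have hca := carry_around_add_eq acc (wordAt cs i) h1 h2 hw.1 (by omega)
    have hcb := ccNorm_bounds (acc + wordAt cs i) (by omega)
    simp only [List.foldl_cons, List.map_cons, List.sum_cons]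
    rw [hca, ih _ hcb.1 hcb.2, ccNorm_add _ _ (by omega) hsum]
    ring_nf

-- break-elimination: if len-1 is not among the indices, the loop is a plain fold
theorem goA_no_break (cs : List Char) (idxs : List Int)
    (h : ((cs.length : Int) - 1) ∉ idxs) (acc : Int) :
    validateGoA cs idxs acc = idxs.foldl (fun a i => carry_around_add a (wordAt cs i)) acc := by
  induction idxs generalizing acc with
  | nil => rfl
  | cons i rest ih =>
    have hi : i ≠ (cs.length : Int) - 1 := fun he => h (he ▸ List.mem_cons_self ..)
    rw [validateGoA, if_neg hi, List.foldl_cons]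
    exact ih (fun hm => h (List.mem_cons_of_mem _ hm)) _

theorem goA_break_last (cs : List Char) (idxs : List Int)
    (h : ((cs.length : Int) - 1) ∉ idxs) (acc : Int) :
    validateGoA cs (idxs ++ [(cs.length : Int) - 1]) acc = validateGoA cs idxs acc := by
  induction idxs generalizing acc with
  | nil => simp [validateGoA]
  | cons i rest ih =>
    have hi : i ≠ (cs.length : Int) - 1 := fun he => h (he ▸ List.mem_cons_self ..)
    rw [List.cons_append, validateGoA, if_neg hi, validateGoA, if_neg hi]
    exact ih (fun hm => h (List.mem_cons_of_mem _ hm)) _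

-- A's index range equals B's, plus possibly the break index len-1 at the end
theorem range_split (n : Int) (hn : 0 ≤ n) :
    PySem.List.pyRange 0 n 2 = PySem.List.pyRange 0 (n - 1) 2
      ∨ PySem.List.pyRange 0 n 2 = PySem.List.pyRange 0 (n - 1) 2 ++ [n - 1] := by
  rw [PySem.List.pyRange_of_pos 0 n (by omega), PySem.List.pyRange_of_pos 0 (n - 1) (by omega)]
  rcases Int.even_or_odd n with ⟨k, hk⟩ | ⟨k, hk⟩
  · left
    have hcnt : (if (0:Int) < n then ((n - 0 + 2 - 1) / 2).toNat else 0)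
        = (if (0:Int) < n - 1 then ((n - 1 - 0 + 2 - 1) / 2).toNat else 0) := by
      split_ifs <;> omega
    rw [hcnt]
  · right
    have hc1 : (if (0:Int) < n then ((n - 0 + 2 - 1) / 2).toNat else 0) = k.toNat + 1 := by
      split_ifs <;> omega
    have hc2 : (if (0:Int) < n - 1 then ((n - 1 - 0 + 2 - 1) / 2).toNat else 0) = k.toNat := by
      split_ifs <;> omega
    rw [hc1, hc2, List.range_succ, List.map_append]
    simp only [List.map_cons, List.map_nil]
    congr 2
    omega

theorem not_mem_range_b (n : Int) : (n - 1) ∉ PySem.List.pyRange 0 (n - 1) 2 := by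
  intro h
  have := (PySem.List.mem_pyRange_iff_of_pos (by omega) (n - 1)).mp h
  omega

-- ordAt shifts past a leading pair
theorem ordAt_cons2 (a b : Char) (r : List Char) (i : Int) (hi : 0 ≤ i) :
    ordAt (a :: b :: r) (i + 2) = ordAt r i := by
  unfold ordAt
  rw [PySem.List.pyGetD_of_nonneg _ _ (by omega), PySem.List.pyGetD_of_nonneg _ _ hi]
  have : (i + 2).toNat = i.toNat + 2 := by omega
  simp [this]

theorem wordAt_cons2 (a b : Char) (r : List Char) (i : Int) (hi : 0 ≤ i) :
    wordAt (a :: b :: r) (i + 2) = wordAt r i := by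
  unfold wordAt
  rw [ordAt_cons2 a b r i hi]
  have : i + 2 + 1 = (i + 1) + 2 := by ring
  rw [this, ordAt_cons2 a b r (i + 1) (by omega)]

theorem ordAt_zero (a : Char) (r : List Char) : ordAt (a :: r) 0 = (a.toNat : Int) := by
  simp [ordAt, PySem.List.pyGetD_of_nonneg _ _ (le_refl (0:Int))]

theorem ordAt_one (a b : Char) (r : List Char) : ordAt (a :: b :: r) 1 = (b.toNat : Int) := by
  rw [ordAt, PySem.List.pyGetD_of_nonneg _ _ (by omega)]
  simp

-- A's per-pair range sum is pairSum
theorem sum_range_word (cs : List Char) :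
    (((List.range (cs.length / 2)).map (fun k : Nat => wordAt cs (2 * (k : Int)))).sum) = pairSum cs := by
  induction cs using pairSum.induct with
  | case1 => simp [pairSum]
  | case2 a => simp [pairSum]
  | case3 a b r ih =>
    have hlen : (a :: b :: r).length / 2 = r.length / 2 + 1 := by simp; omega
    rw [hlen, List.range_succ_eq_map, List.map_cons, List.map_map, List.sum_cons]
    have hhead : wordAt (a :: b :: r) (2 * ((0:Nat) : Int)) = (a.toNat : Int) + 256 * (b.toNat : Int) := by
      have : (2 * ((0:Nat) : Int)) = 0 := by norm_num
      rw [this, wordAt, ordAt_zero]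
      have h1 : (0:Int) + 1 = 1 := by norm_num
      rw [h1, ordAt_one]
      simp [Int.shiftLeft_eq]
      ring
    have htail : (List.range (r.length / 2)).map ((fun k : Nat => wordAt (a :: b :: r) (2 * (k : Int))) ∘ Nat.succ)
        = (List.range (r.length / 2)).map (fun k : Nat => wordAt r (2 * (k : Int))) := by
      apply List.map_congr_left
      intro k _
      show wordAt (a :: b :: r) (2 * ((k + 1 : Nat) : Int)) = wordAt r (2 * (k : Int))
      have : (2 * ((k + 1 : Nat) : Int)) = 2 * (k : Int) + 2 := by push_cast; ring
      rw [this, wordAt_cons2 a b r _ (by positivity)]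
    rw [hhead, htail, ih, pairSum]

-- B's fold over enumerate is wsum
theorem B_fold (l : List Char) : ∀ (s : Int) (acc : Int),
    (PySem.List.enumerate l s).foldl
      (fun acc p => acc + ((p.2.toNat : Int) <<< (8 * PySem.Int.mod p.1 2).toNat)) acc
      = acc + wsum l s := by
  induction l with
  | nil => intro s acc; simp [PySem.List.enumerate_nil, wsum]
  | cons c r ih =>
    intro s acc
    rw [PySem.List.enumerate_cons, List.foldl_cons, ih, wsum]
    ring

theorem wsum_shift2 (l : List Char) : ∀ s : Int, wsum l (s + 2) = wsum l s := by
  induction l with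
  | nil => intro s; rfl
  | cons c r ih =>
    intro s
    rw [wsum, wsum]
    have hm : PySem.Int.mod (s + 2) 2 = PySem.Int.mod s 2 := by
      rw [PySem.Int.mod_eq_emod_of_pos (by omega), PySem.Int.mod_eq_emod_of_pos (by omega)]
      omega
    have : s + 2 + 1 = (s + 1) + 2 := by ring
    rw [hm, this, ih]

theorem wsum_even (l : List Char) (hl : l.length % 2 = 0) : wsum l 0 = pairSum l := by
  induction l using pairSum.induct with
  | case1 => rfl
  | case2 a => simp at hl
  | case3 a b r ih =>
    have hr : r.length % 2 = 0 := by simp at hl; omega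
    rw [wsum, wsum]
    have h01 : (0:Int) + 1 = 1 := by norm_num
    have h2 : (1:Int) + 1 = 0 + 2 := by norm_num
    rw [h01, h2, wsum_shift2, ih hr]
    have hm0 : PySem.Int.mod (0:Int) 2 = 0 := by decide
    have hm1 : PySem.Int.mod (1:Int) 2 = 1 := by decide
    rw [hm0, hm1, pairSum]
    simp [Int.shiftLeft_eq]
    ring

theorem pairSum_take (cs : List Char) : pairSum (cs.take (2 * (cs.length / 2))) = pairSum cs := by
  induction cs using pairSum.induct with
  | case1 => rfl
  | case2 a => simp [pairSum]
  | case3 a b r ih =>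
    have hlen : (a :: b :: r).length / 2 = r.length / 2 + 1 := by simp; omega
    rw [hlen]
    have : 2 * (r.length / 2 + 1) = (2 * (r.length / 2)) + 1 + 1 := by ring
    rw [this, List.take_succ_cons, List.take_succ_cons, pairSum, pairSum, ih]

theorem pairSum_nonneg (cs : List Char) : 0 ≤ pairSum cs := by
  induction cs using pairSum.induct with
  | case1 => exact le_refl 0
  | case2 a => exact le_refl 0
  | case3 a b r ih => rw [pairSum]; positivity

theorem dom_chars (data : String) (received_checksum : Int)
    (hd : Dom_validate_checksum data received_checksum) :
    ∀ c ∈ data.toList, pvDomChar c = true := by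
  unfold Dom_validate_checksum pvDomStr at hd
  simp only [Bool.and_eq_true, List.all_eq_true] at hd
  exact hd.1

-- ===== VERDICT (by name: the statement is the Claim_ definition above) =====
theorem validate_checksum_spec : Claim_equal_validate_checksum := by
  intro data received_checksum hd
  unfold Spec_validate_checksum validate_checksum validate_checksum_alt
  have hc := dom_chars data received_checksum hd
  set cs := data.toList with hcs
  -- the A-side word sum over the pair range
  have hsum : 0 ≤ ((PySem.List.pyRange 0 ((cs.length : Int) - 1) 2).map (wordAt cs)).sum := by
    apply List.sum_nonneg
    intro x hx
    obtain ⟨j, _, rfl⟩ := List.mem_map.mp hx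
    exact (wordAt_bounds cs hc j).1
  have hA : validateGoA cs (PySem.List.pyRange 0 (cs.length : Int) 2) 0
      = ccNorm ((PySem.List.pyRange 0 ((cs.length : Int) - 1) 2).map (wordAt cs)).sum := by
    have hnb := not_mem_range_b (cs.length : Int)
    have hgo : validateGoA cs (PySem.List.pyRange 0 (cs.length : Int) 2) 0
        = validateGoA cs (PySem.List.pyRange 0 ((cs.length : Int) - 1) 2) 0 := by
      rcases range_split (cs.length : Int) (by positivity) with h | h
      · rw [h]
      · rw [h, goA_break_last cs _ hnb]
    rw [hgo, goA_no_break cs _ hnb, foldA_eq_ccNorm cs hc _ 0 le_rfl (by omega)]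
    ring_nf
  -- the A-side range is the map over List.range (len/2)
  have hrange : PySem.List.pyRange 0 ((cs.length : Int) - 1) 2
      = (List.range (cs.length / 2)).map (fun k : Nat => 2 * (k : Int)) := by
    rw [PySem.List.pyRange_of_pos 0 ((cs.length : Int) - 1) (by omega)]
    have hcnt : (if (0:Int) < (cs.length : Int) - 1 then (((cs.length : Int) - 1 - 0 + 2 - 1) / 2).toNat else 0)
        = cs.length / 2 := by
      split_ifs <;> omega
    rw [hcnt]
    apply List.map_congr_left
    intro k _
    ring
  have hS : ((PySem.List.pyRange 0 ((cs.length : Int) - 1) 2).map (wordAt cs)).sum = pairSum cs := by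
    rw [hrange, List.map_map]
    exact sum_range_word cs
  -- B's slice and total
  have hmod : PySem.Int.mod (cs.length : Int) 2 = (cs.length : Int) % 2 :=
    PySem.Int.mod_eq_emod_of_pos (by omega)
  have hn : (cs.length : Int) - PySem.Int.mod (cs.length : Int) 2 = ((2 * (cs.length / 2) : Nat) : Int) := by
    rw [hmod]; omega
  have hslice : PySem.List.slice cs none (some ((cs.length : Int) - PySem.Int.mod (cs.length : Int) 2))
      = cs.take (2 * (cs.length / 2)) := by
    rw [hn, PySem.List.slice_to_natCast]
  have hbodyEven : (cs.take (2 * (cs.length / 2))).length % 2 = 0 := by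
    simp [List.length_take]
    omega
  have hB : (PySem.List.enumerate (PySem.List.slice cs none (some ((cs.length : Int) - PySem.Int.mod (cs.length : Int) 2))) 0).foldl
      (fun acc p => acc + ((p.2.toNat : Int) <<< (8 * PySem.Int.mod p.1 2).toNat)) 0 = pairSum cs := by
    rw [hslice, B_fold, wsum_even _ hbodyEven, pairSum_take]
    ring
  have hccB : (if pairSum cs = 0 then pairSum cs
      else PySem.Int.mod (pairSum cs - 1) 65535 + 1) = ccNorm (pairSum cs) := by
    unfold ccNorm
    have := pairSum_nonneg cs
    split_ifs with h
    · rw [h]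
    · rw [PySem.Int.mod_eq_emod_of_pos (by omega)]
  simp only [hA, hS, hB, hccB]
  split <;> simp_all
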